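-- pv_equiv track=rewrite | github.com/EFord36/normalise | normalise/expand_all.py | expand_PROF
-- ===== SOURCE A (Python) =====
-- def expand_PROF(w):
--     try:
--         """Return 'original' rude word from asterisked 'WDLK'."""
--         rude = ['ass', 'arse', 'asshole', 'balls', 'bitch', 'cunt',
--                 'cock', 'crap', 'cum', 'damn' 'dick', 'fuck', 'motherfucker',
--                 'pussy','shit', 'tits', 'twat', 'wank', 'wanker']
--         candidates = [r for r in rude if len(r) == len(w)]
--         final = ''
--         ind = 0
--         if not candidates:
--             return w
--         else:
--             while not final and ind < len(candidates):
--                 r = candidates[ind]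
--                 match = True
--                 for i in range(len(r)):
--                     if r[i] != w[i] and w[i] != '*':
--                         match = False
--                 if match:
--                     final += r
--                 ind += 1
--             if final:
--                 return final
--             else:
--                 return w
--     except (KeyboardInterrupt, SystemExit):
--         raise
--     except:
--         return w
-- ===== SOURCE B (Python) =====
-- def expand_PROF(w):
--     """Return 'original' rude word from asterisked 'WDLK'."""
--     rude = ['ass', 'arse', 'asshole', 'balls', 'bitch', 'cunt',
--             'cock', 'crap', 'cum', 'damn' 'dick', 'fuck', 'motherfucker',
--             'pussy', 'shit', 'tits', 'twat', 'wank', 'wanker']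
--     # column-wise elimination: narrow the candidate set one character position
--     # at a time; surviving order is rude-list order, so the head is the first match
--     cands = [r for r in rude if len(r) == len(w)]
--     for i, ch in enumerate(w):
--         if ch != '*':
--             cands = [r for r in cands if r[i] == ch]
--     return cands[0] if cands else w
-- ===== Notes on version B (the rewrite author's own statement) =====
-- stated objective: alternative
-- what changed: Inverts the traversal: instead of scanning words and testing every position of each (with a while/flag/accumulator), B filters the whole candidate set column by column over character positions and returns the head of the surviving list.
import Mathlib
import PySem

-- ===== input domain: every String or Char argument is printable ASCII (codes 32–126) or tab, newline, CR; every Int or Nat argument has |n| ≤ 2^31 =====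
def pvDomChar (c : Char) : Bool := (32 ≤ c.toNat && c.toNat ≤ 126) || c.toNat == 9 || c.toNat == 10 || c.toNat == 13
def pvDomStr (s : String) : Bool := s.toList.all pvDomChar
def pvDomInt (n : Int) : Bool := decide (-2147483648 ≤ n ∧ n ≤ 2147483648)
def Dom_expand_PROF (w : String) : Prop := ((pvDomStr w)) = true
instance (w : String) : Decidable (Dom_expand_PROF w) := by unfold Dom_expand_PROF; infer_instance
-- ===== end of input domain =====

-- B inverts A's traversal: instead of A's word-by-word while/flag scan, B narrows the
-- candidate set column by column over character positions (alternative decomposition).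

-- the fixed rude list, with Python's implicit 'damn' 'dick' → "damndick" concatenation preserved
def pvRude : List (List Char) :=
  ["ass", "arse", "asshole", "balls", "bitch", "cunt",
   "cock", "crap", "cum", "damndick", "fuck", "motherfucker",
   "pussy", "shit", "tits", "twat", "wank", "wanker"].map String.toList

-- ===== PORT A =====
-- inner 'for i in range(len(r))' loop setting the match flag (indices always in range: len r = len w)
def pvMatchA (r wl : List Char) : Bool :=
  (List.range r.length).foldl
    (fun m i => if r.getD i ' ' ≠ wl.getD i ' ' ∧ wl.getD i ' ' ≠ '*' then false else m) true

-- the 'while not final and ind < len(candidates)' loop, recursion over the candidate list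
def pvWhileA (wl : List Char) : List (List Char) → List Char → List Char
  | [], final => final
  | r :: rest, final =>
      if final ≠ [] then final
      else pvWhileA wl rest (if pvMatchA r wl then final ++ r else final)

def expand_PROF (w : String) : String :=
  let wl := w.toList
  let candidates := pvRude.filter (fun r => r.length == wl.length)
  if candidates = [] then w
  else
    let final := pvWhileA wl candidates []
    if final ≠ [] then String.ofList final else w

-- ===== PORT B =====
-- column-wise elimination: 'for i, ch in enumerate(w): if ch != '*': cands = [r for r in cands if r[i] == ch]'
def expand_PROF_alt (w : String) : String :=
  let wl := w.toList
  let cands0 := pvRude.filter (fun r => r.length == wl.length)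
  let cands := (PySem.List.enumerate wl).foldl
      (fun cs p => if p.2 ≠ '*' then cs.filter (fun r => PySem.List.pyGetD r p.1 ' ' == p.2) else cs)
      cands0
  match cands with
  | r :: _ => String.ofList r
  | [] => w

-- ===== PRECONDITION & SPEC =====
def Spec_expand_PROF (w : String) (out : String) : Prop := out = expand_PROF_alt w
instance (w : String) (out : String) : Decidable (Spec_expand_PROF w out) := by unfold Spec_expand_PROF; infer_instance

-- ===== CLAIM (what is proved, stated in full; the proofs are below) =====
def Claim_equal_expand_PROF : Prop := ∀ (w : String), Dom_expand_PROF w → Spec_expand_PROF w (expand_PROF w)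

-- ===== LEMMAS AND PROOFS =====

-- the range-fold flag of A's inner loop, as a decided universal over the indices
lemma foldl_flag (p : Nat → Prop) [DecidablePred p] (n : Nat) (b : Bool) :
    (List.range n).foldl (fun m i => if p i then false else m) b
      = (b && decide (∀ i < n, ¬ p i)) := by
  induction n generalizing b with
  | zero => simp
  | succ n ih =>
      rw [List.range_succ, List.foldl_append]
      simp only [List.foldl_cons, List.foldl_nil]
      rw [ih]
      by_cases hp : p n
      · have hd : decide (∀ i < n + 1, ¬ p i) = false := by
          simp only [decide_eq_false_iff_not]
          intro h; exact h n (by omega) hp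
        rw [if_pos hp, hd, Bool.and_false]
      · have hd : decide (∀ i < n + 1, ¬ p i) = decide (∀ i < n, ¬ p i) := by
          rw [decide_eq_decide]
          constructor
          · intro h i hi; exact h i (by omega)
          · intro h i hi
            by_cases hin : i < n
            · exact h i hin
            · have : i = n := by omega
              subst this; exact hp
        rw [if_neg hp, hd]

-- B's staged filters collapse into one filter with the conjunction of the column conditions
lemma foldl_staged (l : List (Int × Char)) (cs : List (List Char)) :
    l.foldl
      (fun cs p => if p.2 ≠ '*' then cs.filter (fun r => PySem.List.pyGetD r p.1 ' ' == p.2) else cs)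
      cs
    = cs.filter (fun r => l.all (fun p => p.2 == '*' || PySem.List.pyGetD r p.1 ' ' == p.2)) := by
  induction l generalizing cs with
  | nil => simp
  | cons p l ih =>
      simp only [List.foldl_cons, List.all_cons]
      by_cases hp : p.2 = '*'
      · have h2 : (p.2 == '*') = true := by simpa using hp
        rw [if_neg (by simp [hp]), ih]
        simp only [h2, Bool.true_or, Bool.true_and]
      · have h2 : (p.2 == '*') = false := by simpa using hp
        rw [if_pos hp, ih, List.filter_filter]
        apply List.filter_congr
        intro r _
        simp only [h2, Bool.false_or]
        exact Bool.and_comm _ _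

-- A's index-wise match equals B's enumerate-based column conditions (equal lengths)
lemma matchA_eq_all (r wl : List Char) (hlen : r.length = wl.length) :
    pvMatchA r wl
      = (PySem.List.enumerate wl).all
          (fun p => p.2 == '*' || PySem.List.pyGetD r p.1 ' ' == p.2) := by
  unfold pvMatchA
  rw [foldl_flag (fun i => r.getD i ' ' ≠ wl.getD i ' ' ∧ wl.getD i ' ' ≠ '*')]
  rw [Bool.true_and, Bool.eq_iff_iff, decide_eq_true_eq, List.all_eq_true]
  constructor
  · intro h p hp
    rcases (PySem.List.mem_enumerate_iff _ _ _).mp hp with ⟨k, hk, rfl⟩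
    have := h k (by omega)
    simp only [zero_add, PySem.List.pyGetD_natCast]
    by_cases hstar : wl[k] = '*'
    · simp [hstar]
    · have hget : wl.getD k ' ' = wl[k] := List.getD_eq_getElem wl ' ' hk
      rw [hget] at this
      have hr : r.getD k ' ' = wl[k] := by
        by_contra hne
        exact this ⟨hne, hstar⟩
      rw [List.getD_eq_getElem r ' ' (by omega)] at hr
      simp [List.getD, List.getElem?_eq_getElem (show k < r.length by omega), hr]
  · intro h i hi
    have hkw : i < wl.length := by omega
    have hp : ((i : Int), wl[i]) ∈ PySem.List.enumerate wl := by
      rw [PySem.List.mem_enumerate_iff _ _ _]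
      exact ⟨i, hkw, by simp⟩
    have := h _ hp
    simp only [PySem.List.pyGetD_natCast] at this
    rw [List.getD_eq_getElem wl ' ' hkw]
    rcases Bool.or_eq_true_iff.mp this with h' | h'
    · intro hc; exact hc.2 (by simpa using h')
    · intro hc; exact hc.1 (by simpa using h')

-- A's while loop with empty accumulator returns the first matching candidate (or [])
lemma whileA_eq_find (wl : List Char) (cands : List (List Char))
    (hne : ∀ r ∈ cands, r ≠ []) :
    pvWhileA wl cands [] = (cands.find? (fun r => pvMatchA r wl)).getD [] := by
  induction cands with
  | nil => simp [pvWhileA]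
  | cons r rest ih =>
      simp only [pvWhileA, if_neg (by simp : ¬(([] : List Char) ≠ []))]
      by_cases hm : pvMatchA r wl
      · have hr : r ≠ [] := hne r (List.mem_cons_self ..)
        rw [if_pos hm]
        simp only [List.nil_append]
        have hw : pvWhileA wl rest r = r := by
          cases rest with
          | nil => simp [pvWhileA]
          | cons s ss => simp [pvWhileA, hr]
        rw [hw, List.find?_cons_of_pos (p := fun s => pvMatchA s wl) hm]
        rfl
      · rw [if_neg hm, List.find?_cons_of_neg (p := fun s => pvMatchA s wl) (by simpa using hm)]
        exact ih (fun s hs => hne s (List.mem_cons_of_mem _ hs))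

lemma rude_ne_nil : ∀ r ∈ pvRude, r ≠ [] := by decide

-- the head of a filtered list is its first match
lemma head?_filter (l : List (List Char)) (q : List Char → Bool) :
    (l.filter q).head? = l.find? q := by
  induction l with
  | nil => simp
  | cons a as ih =>
      by_cases h : q a
      · rw [List.filter_cons_of_pos h, List.find?_cons_of_pos h]; rfl
      · rw [List.filter_cons_of_neg (by simpa using h), List.find?_cons_of_neg (by simpa using h), ih]

lemma filter_congr_mem (l : List (List Char)) (f g : List Char → Bool)
    (h : ∀ r ∈ l, f r = g r) : l.filter f = l.filter g :=
  List.filter_congr h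

-- ===== VERDICT (by name: the statement is the Claim_ definition above) =====
theorem expand_PROF_spec : Claim_equal_expand_PROF := by
  intro w _
  unfold Spec_expand_PROF expand_PROF expand_PROF_alt
  simp only []
  set wl := w.toList with hwl
  set cands := pvRude.filter (fun r => r.length == wl.length) with hcands
  rw [foldl_staged]
  have hfilter : cands.filter
      (fun r => (PySem.List.enumerate wl).all
        (fun p => p.2 == '*' || PySem.List.pyGetD r p.1 ' ' == p.2))
      = cands.filter (fun r => pvMatchA r wl) := by
    apply filter_congr_mem
    intro r hr
    have hlen : r.length = wl.length := by
      have := (List.mem_filter.mp hr).2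
      simpa using this
    exact (matchA_eq_all r wl hlen).symm
  rw [hfilter]
  have hne : ∀ r ∈ cands, r ≠ [] := fun r hr => rude_ne_nil r (List.mem_filter.mp hr).1
  by_cases hc : cands = []
  · rw [if_pos hc, hc]
    simp
  · rw [if_neg hc, whileA_eq_find wl cands hne]
    cases hf : cands.find? (fun r => pvMatchA r wl) with
    | none =>
        rw [← head?_filter] at hf
        rcases List.head?_eq_none_iff.mp hf with h0
        rw [h0]
        simp
    | some r =>
        have hrmem : r ∈ cands := List.mem_of_find?_eq_some hf
        have hrne : r ≠ [] := hne r hrmem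
        rw [← head?_filter] at hf
        cases hfl : cands.filter (fun r => pvMatchA r wl) with
        | nil => rw [hfl] at hf; simp at hf
        | cons a as =>
            rw [hfl] at hf
            simp only [List.head?_cons, Option.some.injEq] at hf
            subst hf
            simp [hrne]
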